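-- pv_equiv track=rewrite | github.com/lihan829/BUFIA_AR | autorep.py | is_modified_substring
-- ===== SOURCE A (Python) =====
-- def is_modified_substring(list_a, list_b):
--     if list_a == list_b:
--         return True
--
--     n, m = len(list_a), len(list_b)
--
--     for i in range(m - n + 1):
--         window = list_b[i:i+n]
--
--         # Skip if list_a[-1] > window[-1]
--         if list_a[-1] > window[-1]:
--             continue
--
--         # Check middle elements
--         middle_match = True
--         for a, b in zip(list_a[1:-1], window[1:-1]):
--             if a != 0 and a != b:
--                 middle_match = False
--                 break
--
--         if middle_match:
--             return True
--
--     return False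
-- ===== SOURCE B (Python) =====
-- def is_modified_substring(list_a, list_b):
--     n, m = len(list_a), len(list_b)
--     if n == 0:
--         return m == 0
--     last = list_a[-1]
--     valid = [i for i in range(m - n + 1) if list_b[i + n - 1] >= last]
--     for j in range(1, n - 1):
--         a = list_a[j]
--         if a != 0:
--             valid = [i for i in valid if list_b[i + j] == a]
--             if not valid:
--                 return False
--     return bool(valid)
-- ===== Notes on version B (the rewrite author's own statement) =====
-- stated objective: alternative
-- what changed: B transposes the loops: instead of scanning each window and checking its middle with an inner break, it builds the candidate set of start positions passing the last-element test once, then for each non-wildcard middle pattern index filters the whole candidate set, returning False as soon as it empties; the window-equality fast path and slicing disappear.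
import Mathlib
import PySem

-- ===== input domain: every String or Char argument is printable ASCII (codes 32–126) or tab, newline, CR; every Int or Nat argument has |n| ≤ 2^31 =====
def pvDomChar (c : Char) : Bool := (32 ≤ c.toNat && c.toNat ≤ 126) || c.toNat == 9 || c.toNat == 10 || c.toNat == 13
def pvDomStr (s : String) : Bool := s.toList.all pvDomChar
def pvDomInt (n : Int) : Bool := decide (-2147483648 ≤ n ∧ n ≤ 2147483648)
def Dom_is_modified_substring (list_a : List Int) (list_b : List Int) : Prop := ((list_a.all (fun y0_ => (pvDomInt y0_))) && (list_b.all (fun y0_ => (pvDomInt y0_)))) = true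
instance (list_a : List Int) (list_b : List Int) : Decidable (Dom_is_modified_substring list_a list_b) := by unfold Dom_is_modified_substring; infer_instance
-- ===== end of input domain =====

-- B rewrites the window-major scan with an inner break as a pattern-major filter of a candidate
-- set of start positions (objective: alternative decomposition, same worst-case cost).

-- ===== PORT A =====
-- inner 'for a, b in zip(list_a[1:-1], window[1:-1]): … break' loop
def pvMidMatch : List (Int × Int) → Bool
  | [] => true
  | (a, b) :: rest => if a ≠ 0 ∧ a ≠ b then false else pvMidMatch rest

-- 'for i in range(m - n + 1): …'; the none branches are Python's IndexError (excluded by Pre_)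
def pvALoop (list_a list_b : List Int) (n : Int) : List Int → Bool
  | [] => false
  | i :: rest =>
    let window := PySem.List.slice list_b (some i) (some (i + n))
    match PySem.List.pyGet? list_a (-1), PySem.List.pyGet? window (-1) with
    | some alast, some wlast =>
      if alast > wlast then pvALoop list_a list_b n rest
      else if pvMidMatch ((PySem.List.slice list_a (some 1) (some (-1))).zip
                          (PySem.List.slice window (some 1) (some (-1)))) then true
      else pvALoop list_a list_b n rest
    | _, _ => false

def is_modified_substring (list_a : List Int) (list_b : List Int) : Bool :=
  if list_a == list_b then true
  else pvALoop list_a list_b (list_a.length : Int)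
        (PySem.List.pyRange 0 ((list_b.length : Int) - (list_a.length : Int) + 1) 1)

-- ===== PORT B =====
-- 'for j in range(1, n - 1): …' shrinking the candidate list, with the early empty-exit
def pvBLoop (list_a list_b : List Int) (valid : List Int) : List Int → Bool
  | [] => !valid.isEmpty
  | j :: js =>
    let a := PySem.List.pyGetD list_a j 0
    if a ≠ 0 then
      let valid' := valid.filter (fun i => PySem.List.pyGetD list_b (i + j) 0 == a)
      if valid'.isEmpty then false else pvBLoop list_a list_b valid' js
    else pvBLoop list_a list_b valid js

def is_modified_substring_alt (list_a : List Int) (list_b : List Int) : Bool :=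
  let n : Int := list_a.length
  let m : Int := list_b.length
  if list_a.length == 0 then decide (m = 0)
  else
    let last := PySem.List.pyGetD list_a (-1) 0
    let valid := (PySem.List.pyRange 0 (m - n + 1) 1).filter
        (fun i => decide (last ≤ PySem.List.pyGetD list_b (i + n - 1) 0))
    pvBLoop list_a list_b valid (PySem.List.pyRange 1 (n - 1) 1)

-- ===== PRECONDITION & SPEC =====
-- Pre_ excludes exactly the inputs where A raises IndexError: list_a empty while list_b is not
-- (list_a[-1] is evaluated inside the loop).
def Pre_is_modified_substring (list_a : List Int) (list_b : List Int) : Prop :=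
  list_a ≠ [] ∨ list_b = []
instance (list_a : List Int) (list_b : List Int) : Decidable (Pre_is_modified_substring list_a list_b) := by unfold Pre_is_modified_substring; infer_instance

def pvWitness_is_modified_substring : List Int × List Int := ([1, 0, 2], [5, 1, 7, 3, 4])

def Spec_is_modified_substring (list_a : List Int) (list_b : List Int) (out : Bool) : Prop := out = is_modified_substring_alt list_a list_b
instance (list_a : List Int) (list_b : List Int) (out : Bool) : Decidable (Spec_is_modified_substring list_a list_b out) := by unfold Spec_is_modified_substring; infer_instance

-- ===== CLAIM (what is proved, stated in full; the proofs are below) =====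
def Claim_equal_is_modified_substring : Prop := ∀ (list_a : List Int) (list_b : List Int), Dom_is_modified_substring list_a list_b → Pre_is_modified_substring list_a list_b → Spec_is_modified_substring list_a list_b (is_modified_substring list_a list_b)

-- ===== LEMMAS AND PROOFS =====

-- B's loop computes: the candidate list filtered by every remaining middle condition is nonempty.
theorem pvBLoop_eq (list_a list_b : List Int) (js valid : List Int) :
    pvBLoop list_a list_b valid js =
      !(valid.filter (fun i => js.all (fun j =>
          PySem.List.pyGetD list_a j 0 == 0 ||
          PySem.List.pyGetD list_b (i + j) 0 == PySem.List.pyGetD list_a j 0))).isEmpty := by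
  induction js generalizing valid with
  | nil => simp [pvBLoop]
  | cons j js ih =>
    simp only [pvBLoop]
    by_cases h : PySem.List.pyGetD list_a j 0 = 0
    · simp [h, ih, List.all_cons]
    · simp only [ne_eq, h, not_false_eq_true, if_true]
      have hff : valid.filter (fun i =>
            (PySem.List.pyGetD list_a j 0 == 0 ||
              PySem.List.pyGetD list_b (i + j) 0 == PySem.List.pyGetD list_a j 0) &&
            js.all (fun j => PySem.List.pyGetD list_a j 0 == 0 ||
              PySem.List.pyGetD list_b (i + j) 0 == PySem.List.pyGetD list_a j 0)) =
          (valid.filter (fun i => PySem.List.pyGetD list_b (i + j) 0 == PySem.List.pyGetD list_a j 0)).filter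
            (fun i => js.all (fun j => PySem.List.pyGetD list_a j 0 == 0 ||
              PySem.List.pyGetD list_b (i + j) 0 == PySem.List.pyGetD list_a j 0)) := by
        rw [List.filter_filter]
        apply List.filter_congr
        intro x _
        have hc : (PySem.List.pyGetD list_a j 0 == 0) = false := by
          simpa using h
        simp [hc, Bool.and_comm]
      simp only [List.all_cons]
      split_ifs with he
      · rw [hff]
        rw [List.isEmpty_iff] at he
        simp [he]
      · rw [ih, hff]

-- A's loop is an 'any' over the candidate positions (given list_a and every window nonempty).
theorem pvALoop_eq (list_a list_b : List Int) (n : Int) (is : List Int)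
    (hla : list_a ≠ [])
    (hwin : ∀ i ∈ is, PySem.List.slice list_b (some i) (some (i + n)) ≠ []) :
    pvALoop list_a list_b n is = is.any (fun i =>
      match PySem.List.pyGet? list_a (-1),
            PySem.List.pyGet? (PySem.List.slice list_b (some i) (some (i + n))) (-1) with
      | some alast, some wlast =>
        !(decide (wlast < alast)) &&
          pvMidMatch ((PySem.List.slice list_a (some 1) (some (-1))).zip
            (PySem.List.slice (PySem.List.slice list_b (some i) (some (i + n))) (some 1) (some (-1))))
      | _, _ => false) := by
  induction is with
  | nil => rfl
  | cons i rest ih =>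
    have hw := hwin i (by simp)
    obtain ⟨wl, hwl⟩ : ∃ w, PySem.List.pyGet? (PySem.List.slice list_b (some i) (some (i + n))) (-1) = some w := by
      rw [PySem.List.pyGet?_neg_one]
      exact Option.isSome_iff_exists.mp (List.getLast?_isSome.mpr hw)
    obtain ⟨al, hal⟩ : ∃ a, PySem.List.pyGet? list_a (-1) = some a := by
      rw [PySem.List.pyGet?_neg_one]
      exact Option.isSome_iff_exists.mp (List.getLast?_isSome.mpr hla)
    simp only [pvALoop, List.any_cons, hal, hwl]
    rw [ih (fun x hx => hwin x (List.mem_cons_of_mem _ hx))]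
    by_cases hlt : wl < al
    · simp [hlt, gt_iff_lt, hal]
    · by_cases hm : pvMidMatch ((PySem.List.slice list_a (some 1) (some (-1))).zip
            (PySem.List.slice (PySem.List.slice list_b (some i) (some (i + n))) (some 1) (some (-1)))) = true
      · simp [hlt, hm, gt_iff_lt]
      · simp [hlt, Bool.eq_false_iff.mpr hm, gt_iff_lt, hal]

theorem pvMidMatch_eq (zs : List (Int × Int)) :
    pvMidMatch zs = zs.all (fun p => p.1 == 0 || p.1 == p.2) := by
  induction zs with
  | nil => rfl
  | cons z zs ih =>
    obtain ⟨a, b⟩ := z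
    simp only [pvMidMatch, List.all_cons, ih]
    by_cases h0 : a = 0 <;> by_cases hb : a = b <;> simp [h0, hb]

-- a nonempty filtered list, as 'any'
theorem pvFilterAny (l : List Int) (p : Int → Bool) : (!(l.filter p).isEmpty) = l.any p := by
  induction l with
  | nil => simp
  | cons x t ih => by_cases h : p x <;> simp [h, ih]

-- xs[1:-1] as drop/take
theorem pvSlice_one_neg_one (xs : List Int) :
    PySem.List.slice xs (some 1) (some (-1)) = (xs.drop 1).take (xs.length - 2) := by
  simp [PySem.List.slice]
  rcases xs with _ | ⟨x, t⟩ <;> simp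

theorem pvAllRangeCongr (L : Nat) (f g : Nat → Bool) (h : ∀ k, k < L → f k = g k) :
    (List.range L).all f = (List.range L).all g := by
  rw [Bool.eq_iff_iff, List.all_eq_true, List.all_eq_true]
  simp only [List.mem_range]
  exact ⟨fun hh k hk => (h k hk) ▸ hh k hk, fun hh k hk => (h k hk).symm ▸ hh k hk⟩

-- 'all' over a zip of equal-length lists, as 'all' over indices
theorem pvAllZip (xs : List Int) : ∀ (ys : List Int) (L : Nat), xs.length = L → ys.length = L →
    ∀ (p : Int × Int → Bool),
    (xs.zip ys).all p = (List.range L).all (fun k => p (xs.getD k 0, ys.getD k 0)) := by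
  induction xs with
  | nil =>
    intro ys L hx _ p
    have : L = 0 := by simpa using hx.symm
    subst this
    simp
  | cons x xs ih =>
    intro ys L hx hy p
    rcases ys with _ | ⟨y, ys⟩
    · simp at hx hy; omega
    · rcases L with _ | L
      · simp at hx
      · have h1 : xs.length = L := by simpa using hx
        have h2 : ys.length = L := by simpa using hy
        rw [List.zip_cons_cons, List.all_cons, List.range_succ_eq_map, List.all_cons,
          List.all_map, ih ys L h1 h2]
        simp [Function.comp_def]

-- the per-start-position check of A equals the P-and-Q check of B
theorem pvPointwise (la lb : List Int) (hla : la ≠ []) (d : Nat)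
    (hiu : d + la.length ≤ lb.length) :
    (match PySem.List.pyGet? la (-1),
           PySem.List.pyGet? (PySem.List.slice lb (some (d : Int)) (some ((d : Int) + (la.length : Int)))) (-1) with
     | some alast, some wlast =>
        !(decide (wlast < alast)) &&
          pvMidMatch ((PySem.List.slice la (some 1) (some (-1))).zip
            (PySem.List.slice (PySem.List.slice lb (some (d : Int)) (some ((d : Int) + (la.length : Int)))) (some 1) (some (-1))))
     | _, _ => false)
    = ((decide (PySem.List.pyGetD la (-1) 0 ≤ PySem.List.pyGetD lb ((d : Int) + (la.length : Int) - 1) 0)) &&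
       (PySem.List.pyRange 1 ((la.length : Int) - 1) 1).all (fun j =>
          PySem.List.pyGetD la j 0 == 0 ||
          PySem.List.pyGetD lb ((d : Int) + j) 0 == PySem.List.pyGetD la j 0)) := by
  have hn : 0 < la.length := List.length_pos_iff.mpr hla
  have hwin := PySem.List.slice_natCast_add lb d la.length
  have hwlen : ((lb.drop d).take la.length).length = la.length := by simp; omega
  have hwne : (lb.drop d).take la.length ≠ [] := by
    intro hcon; rw [hcon] at hwlen; simp at hwlen; omega
  have hga : PySem.List.pyGet? la (-1) = some (la.getLast hla) := by
    rw [PySem.List.pyGet?_neg_one]; exact List.getLast?_eq_some_getLast hla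
  have hgw : PySem.List.pyGet? (PySem.List.slice lb (some (d : Int)) (some ((d : Int) + (la.length : Int)))) (-1)
      = some (((lb.drop d).take la.length).getLast hwne) := by
    rw [hwin, PySem.List.pyGet?_neg_one]; exact List.getLast?_eq_some_getLast hwne
  simp only [hga, hgw]
  have eA : la.getLast hla = PySem.List.pyGetD la (-1) 0 := (PySem.List.pyGetD_neg_one la 0 hla).symm
  have eW : ((lb.drop d).take la.length).getLast hwne
      = PySem.List.pyGetD lb ((d : Int) + (la.length : Int) - 1) 0 := by
    have e0 : (d : Int) + (la.length : Int) - 1 = ((d + la.length - 1 : Nat) : Int) := by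
      omega
    rw [e0, PySem.List.pyGetD_natCast,
      List.getD_eq_getElem lb 0 (show d + la.length - 1 < lb.length by omega),
      List.getLast_eq_getElem]
    simp only [hwlen, List.getElem_take, List.getElem_drop]
    congr 1
    omega
  rw [eA, eW]
  congr 1
  · rw [← decide_not, decide_eq_decide]
    exact not_lt
  · rw [pvMidMatch_eq, pvSlice_one_neg_one, hwin, pvSlice_one_neg_one]
    simp only [hwlen]
    rw [pvAllZip _ _ (la.length - 2) (by simp; omega) (by simp [hwlen]; omega)]
    rw [PySem.List.pyRange_one]
    have e1 : ((la.length : Int) - 1 - 1).toNat = la.length - 2 := by omega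
    rw [e1, List.all_map]
    apply pvAllRangeCongr
    intro k hk
    have hx : ((la.drop 1).take (la.length - 2)).getD k 0 = la[1 + k]'(by omega) := by
      rw [List.getD_eq_getElem _ 0 (by simp; omega)]
      simp only [List.getElem_take, List.getElem_drop]
    have hy : ((((lb.drop d).take la.length).drop 1).take (la.length - 2)).getD k 0
        = lb[d + (1 + k)]'(by omega) := by
      rw [List.getD_eq_getElem _ 0 (by simp [hwlen]; omega)]
      simp only [List.getElem_take, List.getElem_drop]
    have ej : (1 : Int) + (k : Int) = ((1 + k : Nat) : Int) := by push_cast; ring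
    have hja : PySem.List.pyGetD la ((fun k => 1 + (k : Int)) k) 0 = la[1 + k]'(by omega) := by
      simp only [ej, PySem.List.pyGetD_natCast]
      exact List.getD_eq_getElem la 0 (by omega)
    have hjb : PySem.List.pyGetD lb ((d : Int) + ((fun k => 1 + (k : Int)) k)) 0
        = lb[d + (1 + k)]'(by omega) := by
      have e2 : (d : Int) + (1 + (k : Int)) = ((d + (1 + k) : Nat) : Int) := by push_cast; ring
      simp only [e2, PySem.List.pyGetD_natCast]
      exact List.getD_eq_getElem lb 0 (by omega)
    simp only [Function.comp_def] at *
    rw [hx, hy]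
    simp only [hja, hjb]
    rw [Bool.eq_iff_iff]
    simp only [Bool.or_eq_true, beq_iff_eq]
    exact ⟨Or.imp id Eq.symm, Or.imp id Eq.symm⟩

-- ===== VERDICT (by name: the statement is the Claim_ definition above) =====
theorem is_modified_substring_spec : Claim_equal_is_modified_substring := by
  intro la lb _ hpre
  unfold Spec_is_modified_substring
  by_cases hla : la = []
  · subst hla
    rcases hpre with h | h
    · exact absurd rfl h
    · subst h; rfl
  · have hn : 0 < la.length := List.length_pos_iff.mpr hla
    have hB : is_modified_substring_alt la lb =
        (PySem.List.pyRange 0 ((lb.length : Int) - (la.length : Int) + 1) 1).any (fun i =>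
          decide (PySem.List.pyGetD la (-1) 0 ≤ PySem.List.pyGetD lb (i + (la.length : Int) - 1) 0) &&
          (PySem.List.pyRange 1 ((la.length : Int) - 1) 1).all (fun j =>
            PySem.List.pyGetD la j 0 == 0 ||
            PySem.List.pyGetD lb (i + j) 0 == PySem.List.pyGetD la j 0)) := by
      unfold is_modified_substring_alt
      have h0 : (la.length == 0) = false := by
        simp [List.length_eq_zero_iff, hla]
      rw [h0]
      simp only [Bool.false_eq_true, if_false]
      rw [pvBLoop_eq, pvFilterAny, List.any_filter]
    rw [hB]
    by_cases heq : la = lb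
    · have hA : is_modified_substring la lb = true := by simp [is_modified_substring, heq]
      rw [hA]
      subst heq
      symm
      rw [List.any_eq_true]
      refine ⟨0, ?_, ?_⟩
      · rw [PySem.List.mem_pyRange_one]
        omega
      · have e0 : (0 : Int) + (la.length : Int) - 1 = ((la.length - 1 : Nat) : Int) := by
          push_cast [hn]; omega
        have e1 : PySem.List.pyGetD la ((0 : Int) + (la.length : Int) - 1) 0 = PySem.List.pyGetD la (-1) 0 := by
          rw [e0, PySem.List.pyGetD_natCast, PySem.List.pyGetD_neg_one la 0 hla,
            List.getD_eq_getElem la 0 (show la.length - 1 < la.length by omega),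
            List.getLast_eq_getElem]
        rw [e1]
        simp only [Bool.and_eq_true, decide_eq_true_eq]
        refine ⟨le_refl _, ?_⟩
        rw [List.all_eq_true]
        intro j _
        simp [zero_add]
    · have hA : is_modified_substring la lb =
          pvALoop la lb (la.length : Int)
            (PySem.List.pyRange 0 ((lb.length : Int) - (la.length : Int) + 1) 1) := by
        simp [is_modified_substring, heq]
      have hwin : ∀ i ∈ PySem.List.pyRange 0 ((lb.length : Int) - (la.length : Int) + 1) 1,
          PySem.List.slice lb (some i) (some (i + (la.length : Int))) ≠ [] := by
        intro i hi
        rw [PySem.List.mem_pyRange_one] at hi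
        obtain ⟨d, rfl⟩ := Int.eq_ofNat_of_zero_le hi.1
        rw [PySem.List.slice_natCast_add lb d la.length]
        have hd : d + la.length ≤ lb.length := by omega
        intro hcon
        have hlen : min la.length (lb.length - d) = 0 := by
          simpa using congrArg List.length hcon
        omega
      rw [hA, pvALoop_eq la lb (la.length : Int) _ hla hwin]
      apply PySem.List.any_congr_mem
      intro i hi
      rw [PySem.List.mem_pyRange_one] at hi
      obtain ⟨d, rfl⟩ := Int.eq_ofNat_of_zero_le hi.1
      have hd : d + la.length ≤ lb.length := by omega
      exact pvPointwise la lb hla d hd
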